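-- pv_equiv track=rewrite | github.com/HumphreyHCB/BuboExperiments | LoopProfiling/EarlyTesting/ThirdTest_SimRuns/bubo_async_compare.py | compute_exclusive_cycles
-- ===== SOURCE A (Python) =====
-- def compute_exclusive_cycles(loops, parents):
--     """
--     Given:
--       loops:   dict[(comp_id, method, loop_id)] = inclusive_cycles
--       parents: dict[(comp_id, loop_id)] = parent_loop_id or None
--
--     Return:
--       exclusive: dict[(comp_id, method, loop_id)] = exclusive_cycles
--     """
--     # Map (comp_id, loop_id) -> (comp_id, method, loop_id)
--     key_by_id = {}
--     for (comp_id, method, loop_id) in loops.keys():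
--         key_by_id[(comp_id, loop_id)] = (comp_id, method, loop_id)
--
--     # Build children map from parents
--     children = {}  # (comp_id, parent_loop_id) -> [child_loop_id,...]
--     for (comp_id, loop_id), parent in parents.items():
--         if parent is None:
--             continue
--         children.setdefault((comp_id, parent), []).append(loop_id)
--
--     exclusive = {}
--
--     for (comp_id, method, loop_id), inclusive in loops.items():
--         child_ids = children.get((comp_id, loop_id), [])
--         child_sum = 0
--         for cid in child_ids:
--             child_key = key_by_id.get((comp_id, cid))
--             if child_key is not None:
--                 child_sum += loops.get(child_key, 0)
--
--         excl = inclusive - child_sum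
--         if excl < 0:
--             excl = 0
--         exclusive[(comp_id, method, loop_id)] = excl
--
--     return exclusive
-- ===== SOURCE B (Python) =====
-- def compute_exclusive_cycles(loops, parents):
--     """Id-keyed version: collapse loops to an inclusive-cycles table keyed by
--     (comp_id, loop_id) (last writer wins, like A's key_by_id), scatter each parent
--     edge's child value into a delta table, then clamp once per loop."""
--     incl_by_id = {}
--     for (comp_id, method, loop_id), inc in loops.items():
--         incl_by_id[(comp_id, loop_id)] = inc
--
--     delta = {}
--     for (comp_id, loop_id), parent in parents.items():
--         if parent is None:
--             continue
--         if (comp_id, loop_id) in incl_by_id: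
--             pk = (comp_id, parent)
--             delta[pk] = delta.get(pk, 0) + incl_by_id[(comp_id, loop_id)]
--
--     return {(c, m, l): max(0, inc - delta.get((c, l), 0))
--             for (c, m, l), inc in loops.items()}
-- ===== Notes on version B (the rewrite author's own statement) =====
-- stated objective: simpler
-- what changed: Replaces A's key_by_id full-key map plus a children adjacency map with nested gather loops by a single (comp_id, loop_id)->inclusive table and one scatter pass over the parents edges accumulating each parent's child sum, clamping once per loop at the end.
import Mathlib
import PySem

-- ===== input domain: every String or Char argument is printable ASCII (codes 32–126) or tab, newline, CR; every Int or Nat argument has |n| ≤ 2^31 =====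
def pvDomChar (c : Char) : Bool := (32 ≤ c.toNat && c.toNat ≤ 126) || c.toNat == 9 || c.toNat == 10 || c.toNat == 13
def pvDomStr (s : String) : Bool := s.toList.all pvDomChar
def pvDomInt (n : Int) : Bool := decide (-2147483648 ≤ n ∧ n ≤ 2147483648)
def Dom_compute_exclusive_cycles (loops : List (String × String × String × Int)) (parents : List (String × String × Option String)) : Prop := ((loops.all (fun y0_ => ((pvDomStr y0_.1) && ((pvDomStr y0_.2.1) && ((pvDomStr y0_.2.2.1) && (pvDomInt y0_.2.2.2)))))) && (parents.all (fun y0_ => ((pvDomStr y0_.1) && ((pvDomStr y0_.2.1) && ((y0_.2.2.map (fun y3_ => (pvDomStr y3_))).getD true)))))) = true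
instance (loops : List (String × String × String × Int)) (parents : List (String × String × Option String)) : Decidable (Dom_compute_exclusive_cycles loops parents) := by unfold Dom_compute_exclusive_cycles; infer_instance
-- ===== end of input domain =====

-- B drops A's full-key map and children adjacency map: it keys inclusive cycles directly by
-- (comp_id, loop_id) and scatters each parent edge into a delta table (objective: simpler).

-- ===== PORT A =====
def compute_exclusive_cycles (loops : List (String × String × String × Int)) (parents : List (String × String × Option String)) : List (String × String × String × Int) :=
  -- the dict arguments, decoded as insertion-ordered dicts
  let loopsD : PySem.Dict (String × String × String) Int :=
    PySem.Dict.ofList (loops.map fun q => ((q.1, q.2.1, q.2.2.1), q.2.2.2))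
  let parentsD : PySem.Dict (String × String) (Option String) :=
    PySem.Dict.ofList (parents.map fun q => ((q.1, q.2.1), q.2.2))
  -- key_by_id[(comp_id, loop_id)] = (comp_id, method, loop_id)
  let key_by_id : PySem.Dict (String × String) (String × String × String) :=
    loopsD.keys.foldl (fun d k => d.insert (k.1, k.2.2) k) PySem.Dict.empty
  -- children: (comp_id, parent_loop_id) -> [child_loop_id, ...]
  let children : PySem.Dict (String × String) (List String) :=
    parentsD.items.foldl (fun ch p =>
      match p.2 with
      | none => ch
      | some par => ch.modify (p.1.1, par) [] (· ++ [p.1.2])) PySem.Dict.empty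
  let exclusive : PySem.Dict (String × String × String) Int :=
    loopsD.items.foldl (fun ex q =>
      let child_ids := children.getD (q.1.1, q.1.2.2) []
      let child_sum := child_ids.foldl (fun s cid =>
        match key_by_id.get? (q.1.1, cid) with
        | some ck => s + loopsD.getD ck 0
        | none => s) (0 : Int)
      let excl := q.2 - child_sum
      let excl := if excl < 0 then 0 else excl
      ex.insert q.1 excl) PySem.Dict.empty
  exclusive.items.map (fun q => (q.1.1, q.1.2.1, q.1.2.2, q.2))

-- ===== PORT B =====
def compute_exclusive_cycles_alt (loops : List (String × String × String × Int)) (parents : List (String × String × Option String)) : List (String × String × String × Int) :=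
  let loopsD : PySem.Dict (String × String × String) Int :=
    PySem.Dict.ofList (loops.map fun q => ((q.1, q.2.1, q.2.2.1), q.2.2.2))
  let parentsD : PySem.Dict (String × String) (Option String) :=
    PySem.Dict.ofList (parents.map fun q => ((q.1, q.2.1), q.2.2))
  -- incl_by_id[(comp_id, loop_id)] = inclusive cycles, last writer wins
  let incl_by_id : PySem.Dict (String × String) Int :=
    loopsD.items.foldl (fun d q => d.insert (q.1.1, q.1.2.2) q.2) PySem.Dict.empty
  -- delta[(comp_id, parent_loop_id)] = accumulated sum of children's inclusive cycles
  let delta : PySem.Dict (String × String) Int :=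
    parentsD.items.foldl (fun d p =>
      match p.2 with
      | none => d
      | some par =>
        if incl_by_id.contains p.1
        then d.modify (p.1.1, par) 0 (· + incl_by_id.getD p.1 0)
        else d) PySem.Dict.empty
  loopsD.items.map (fun q => (q.1.1, q.1.2.1, q.1.2.2, max 0 (q.2 - delta.getD (q.1.1, q.1.2.2) 0)))

-- ===== PRECONDITION & SPEC =====
def Spec_compute_exclusive_cycles (loops : List (String × String × String × Int)) (parents : List (String × String × Option String)) (out : List (String × String × String × Int)) : Prop := out = compute_exclusive_cycles_alt loops parents
instance (loops : List (String × String × String × Int)) (parents : List (String × String × Option String)) (out : List (String × String × String × Int)) : Decidable (Spec_compute_exclusive_cycles loops parents out) := by unfold Spec_compute_exclusive_cycles; infer_instance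

-- ===== CLAIM (what is proved, stated in full; the proofs are below) =====
def Claim_equal_compute_exclusive_cycles : Prop := ∀ (loops : List (String × String × String × Int)) (parents : List (String × String × Option String)), Dom_compute_exclusive_cycles loops parents → Spec_compute_exclusive_cycles loops parents (compute_exclusive_cycles loops parents)

-- ===== LEMMAS AND PROOFS =====

-- the (parentKey, childId) edges carried by a parents items list
def pvEdges (es : List ((String × String) × Option String)) : List ((String × String) × String) :=
  es.filterMap (fun p => p.2.map (fun par => ((p.1.1, par), p.1.2)))

-- the contribution of one edge, given key_by_id and loopsD
def pvContrib (keyD : PySem.Dict (String × String) (String × String × String))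
    (loopsD : PySem.Dict (String × String × String) Int)
    (e : (String × String) × String) : Int :=
  match keyD.get? (e.1.1, e.2) with
  | some ck => loopsD.getD ck 0
  | none => 0

-- B's incl_by_id is A's key_by_id with every stored key replaced by its loops value:
-- both folds run over loopsD's keys and insert at the same id pair.
theorem pvIncl_get? (loopsD : PySem.Dict (String × String × String) Int)
    (ks : List (String × String × String))
    (d1 : PySem.Dict (String × String) (String × String × String))
    (d2 : PySem.Dict (String × String) Int)
    (h : ∀ p, d2.get? p = (d1.get? p).map (fun ck => loopsD.getD ck 0)) :
    ∀ p, (ks.foldl (fun d k => d.insert (k.1, k.2.2) (loopsD.getD k 0)) d2).get? p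
      = ((ks.foldl (fun d k => d.insert (k.1, k.2.2) k) d1).get? p).map (fun ck => loopsD.getD ck 0) := by
  induction ks generalizing d1 d2 with
  | nil => exact h
  | cons k rest ih =>
    simp only [List.foldl_cons]
    apply ih
    intro p
    rw [PySem.Dict.get?_insert, PySem.Dict.get?_insert]
    by_cases hp : p = (k.1, k.2.2)
    · simp [hp]
    · simp [hp, h p]

-- A's children-building fold equals a fold of modify/append over the edge list
theorem pvChildren_eq (es : List ((String × String) × Option String))
    (ch : PySem.Dict (String × String) (List String)) :
    es.foldl (fun ch p =>
      match p.2 with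
      | none => ch
      | some par => ch.modify (p.1.1, par) [] (· ++ [p.1.2])) ch
    = (pvEdges es).foldl (fun ch e => ch.modify e.1 [] (· ++ [e.2])) ch := by
  induction es generalizing ch with
  | nil => rfl
  | cons p rest ih =>
    cases hp : p.2 with
    | none => simp [pvEdges, hp, ih]
    | some par => simp [pvEdges, hp, ih]

-- B's delta-building fold equals a keyD-driven fold over the edge list
theorem pvDelta_eq (keyD : PySem.Dict (String × String) (String × String × String))
    (loopsD : PySem.Dict (String × String × String) Int)
    (incl : PySem.Dict (String × String) Int)
    (hrel : ∀ p, incl.get? p = (keyD.get? p).map (fun ck => loopsD.getD ck 0))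
    (es : List ((String × String) × Option String))
    (d : PySem.Dict (String × String) Int) :
    es.foldl (fun d p =>
      match p.2 with
      | none => d
      | some par =>
        if incl.contains p.1
        then d.modify (p.1.1, par) 0 (· + incl.getD p.1 0)
        else d) d
    = (pvEdges es).foldl (fun d e =>
        match keyD.get? (e.1.1, e.2) with
        | none => d
        | some ck => d.modify e.1 0 (· + loopsD.getD ck 0)) d := by
  induction es generalizing d with
  | nil => rfl
  | cons p rest ih =>
    cases hp : p.2 with
    | none => simp [pvEdges, hp, ih]
    | some par =>
      simp only [pvEdges, List.filterMap_cons, hp, Option.map_some, List.foldl_cons]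
      rw [ih]
      have hc : incl.contains p.1 = (keyD.get? p.1).isSome := by
        rw [PySem.Dict.contains_eq_isSome_get?, hrel p.1]
        cases keyD.get? p.1 <;> rfl
      cases hg : keyD.get? p.1 with
      | none => simp [pvEdges, hc, hg]
      | some ck =>
        have hv : incl.getD p.1 0 = loopsD.getD ck 0 := by
          rw [PySem.Dict.getD_eq_get?_getD, hrel p.1, hg]; rfl
        simp only [pvEdges, hc, hg, Option.isSome_some, if_true, hv]

-- the keyD-driven delta fold at a key is the sum of the matching edges' contributions
theorem pvDelta_getD (keyD : PySem.Dict (String × String) (String × String × String))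
    (loopsD : PySem.Dict (String × String × String) Int)
    (edges : List ((String × String) × String))
    (d : PySem.Dict (String × String) Int) (k : String × String) :
    (edges.foldl (fun d e =>
        match keyD.get? (e.1.1, e.2) with
        | none => d
        | some ck => d.modify e.1 0 (· + loopsD.getD ck 0)) d).getD k 0
    = d.getD k 0 + ((edges.filter (fun e => e.1 == k)).map (pvContrib keyD loopsD)).sum := by
  induction edges generalizing d with
  | nil => simp
  | cons e rest ih =>
    simp only [List.foldl_cons, List.filter_cons]
    cases hg : keyD.get? (e.1.1, e.2) with
    | none =>
      rw [ih]
      by_cases hk : e.1 = k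
      · have hbe : (e.1 == k) = true := by simp [hk]
        simp only [hbe, if_pos, List.map_cons, List.sum_cons, pvContrib, hg]
        ring
      · simp [hk]
    | some ck =>
      rw [ih, PySem.Dict.getD_modify]
      by_cases hk : e.1 = k
      · have hc : pvContrib keyD loopsD e = loopsD.getD ck 0 := by simp [pvContrib, hg]
        rw [if_pos hk.symm]
        simp only [hk, beq_self_eq_true, if_true, List.map_cons, List.sum_cons, hc]
        ring
      · have hbe : (e.1 == k) = false := by simp [hk]
        have hkk : ¬ k = e.1 := fun h => hk h.symm
        simp [hbe, hkk]

-- A's inner child_sum fold is a sum over the child-id list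
theorem pvChildSum (keyD : PySem.Dict (String × String) (String × String × String))
    (loopsD : PySem.Dict (String × String × String) Int)
    (c : String) (l : List String) (s0 : Int) :
    l.foldl (fun s cid =>
      match keyD.get? (c, cid) with
      | some ck => s + loopsD.getD ck 0
      | none => s) s0
    = s0 + (l.map (fun cid =>
        match keyD.get? (c, cid) with
        | some ck => loopsD.getD ck 0
        | none => 0)).sum := by
  induction l generalizing s0 with
  | nil => simp
  | cons cid rest ih =>
    simp only [List.foldl_cons, List.map_cons, List.sum_cons]
    cases hg : keyD.get? (c, cid) with
    | none => rw [ih]; ring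
    | some ck => rw [ih]; ring

-- a fold inserting fresh distinct keys appends its entries (specialised to key = Prod.fst)
theorem pvItems_insert_fold (f : (String × String × String) × Int → Int)
    (l : List ((String × String × String) × Int))
    (ex : PySem.Dict (String × String × String) Int)
    (hfresh : ∀ q ∈ l, ex.contains q.1 = false) (hnd : (l.map (·.1)).Nodup) :
    (l.foldl (fun ex q => ex.insert q.1 (f q)) ex).items
      = ex.items ++ l.map (fun q => (q.1, f q)) :=
  PySem.Dict.items_foldl_insert_fresh l (·.1) f ex hfresh hnd

-- per loop entry: A's gathered child_sum equals the scattered keyD-driven delta at that id pair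
theorem pvSums_eq (keyD : PySem.Dict (String × String) (String × String × String))
    (loopsD : PySem.Dict (String × String × String) Int)
    (edges : List ((String × String) × String)) (c lid : String) :
    (((edges.foldl (fun ch e => ch.modify e.1 [] (· ++ [e.2])) PySem.Dict.empty).getD (c, lid) []).map
      (fun cid =>
        match keyD.get? (c, cid) with
        | some ck => loopsD.getD ck 0
        | none => 0)).sum
    = (edges.foldl (fun d e =>
        match keyD.get? (e.1.1, e.2) with
        | none => d
        | some ck => d.modify e.1 0 (· + loopsD.getD ck 0)) PySem.Dict.empty).getD (c, lid) 0 := by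
  rw [PySem.Dict.getD_foldl_modify_append, pvDelta_getD]
  simp only [PySem.Dict.getD_empty, List.nil_append, zero_add, List.map_map]
  congr 1
  apply List.map_congr_left
  intro e he
  have hk : e.1 = (c, lid) := by
    have := List.of_mem_filter he
    exact eq_of_beq this
  simp [pvContrib, Function.comp, hk]

theorem pvEmptyItems : (PySem.Dict.empty : PySem.Dict (String × String × String) Int).items = [] := rfl

-- ===== VERDICT (by name: the statement is the Claim_ definition above) =====
theorem compute_exclusive_cycles_spec : Claim_equal_compute_exclusive_cycles := by
  intro loops parents _
  unfold Spec_compute_exclusive_cycles compute_exclusive_cycles compute_exclusive_cycles_alt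
  simp only []
  set loopsD : PySem.Dict (String × String × String) Int :=
    PySem.Dict.ofList (loops.map fun q => ((q.1, q.2.1, q.2.2.1), q.2.2.2)) with hloopsD
  set parentsD : PySem.Dict (String × String) (Option String) :=
    PySem.Dict.ofList (parents.map fun q => ((q.1, q.2.1), q.2.2)) with hparentsD
  set keyD : PySem.Dict (String × String) (String × String × String) :=
    loopsD.keys.foldl (fun d k => d.insert (k.1, k.2.2) k) PySem.Dict.empty with hkeyD
  have hndk : loopsD.keys.Nodup := PySem.Dict.nodup_keys_ofList _
  -- B's incl_by_id fold, rewritten as a fold over loopsD.keys, relates pointwise to keyD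
  have hitems : loopsD.items = loopsD.keys.map (fun k => (k, loopsD.getD k 0)) :=
    PySem.Dict.items_eq_map_keys loopsD hndk 0
  have hrel : ∀ p, (loopsD.items.foldl (fun d q => d.insert (q.1.1, q.1.2.2) q.2)
      (PySem.Dict.empty : PySem.Dict (String × String) Int)).get? p
      = (keyD.get? p).map (fun ck => loopsD.getD ck 0) := by
    intro p
    rw [hitems, List.foldl_map, hkeyD]
    exact pvIncl_get? loopsD loopsD.keys PySem.Dict.empty PySem.Dict.empty
      (fun p => by simp [PySem.Dict.get?_empty]) p
  -- rewrite both folds over parentsD.items to keyD-driven folds over the edge list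
  rw [pvChildren_eq, pvDelta_eq keyD loopsD _ hrel]
  set edges := pvEdges parentsD.items with hedges
  -- A's final fold inserts fresh distinct keys, so its items are a map over loopsD.items
  have hnd : (loopsD.items.map (·.1)).Nodup := hndk
  rw [pvItems_insert_fold _ _ _ (fun q _ => PySem.Dict.contains_empty _) hnd]
  simp only [pvEmptyItems, List.nil_append, List.map_map]
  apply List.map_congr_left
  intro q _
  simp only [Function.comp]
  rw [pvChildSum, zero_add, pvSums_eq keyD loopsD edges q.1.1 q.1.2.2]
  have hm : ∀ a : Int, (if a < 0 then (0 : Int) else a) = max 0 a := fun a => by omega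
  rw [hm]
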